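-- pv_equiv track=rewrite | github.com/deanhayden22-wq/ae6l600l | scripts/rom_region_map.py | find_ff_regions
-- ===== SOURCE A (Python) =====
-- def find_ff_regions(rom, min_size=32):
--     """Find contiguous regions of 0xFF bytes (ROM holes)."""
--     regions = []
--     start = None
--     for i in range(len(rom)):
--         if rom[i] == 0xFF:
--             if start is None:
--                 start = i
--         else:
--             if start is not None:
--                 length = i - start
--                 if length >= min_size:
--                     regions.append((start, length))
--                 start = None
--     if start is not None:
--         length = len(rom) - start
--         if length >= min_size:
--             regions.append((start, length))
--     return regions
-- ===== SOURCE B (Python) =====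
-- def find_ff_regions(rom, min_size=32):
--     """Find contiguous regions of 0xFF bytes (ROM holes) by run-length scanning:
--     walk the data run by run and keep each 0xFF run long enough."""
--     regions = []
--     n = len(rom)
--     pos = 0
--     while pos < n:
--         end = pos + 1
--         while end < n and rom[end] == rom[pos]:
--             end += 1
--         if rom[pos] == 0xFF and end - pos >= min_size:
--             regions.append((pos, end - pos))
--         pos = end
--     return regions
-- ===== Notes on version B (the rewrite author's own statement) =====
-- stated objective: alternative
-- what changed: Replaced the start/None state machine with a run-length scan: an outer loop advances run by run (inner scan finds each run's end) and appends qualifying 0xFF runs directly, removing the optional-start state and the separate trailing-region epilogue.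
import Mathlib
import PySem

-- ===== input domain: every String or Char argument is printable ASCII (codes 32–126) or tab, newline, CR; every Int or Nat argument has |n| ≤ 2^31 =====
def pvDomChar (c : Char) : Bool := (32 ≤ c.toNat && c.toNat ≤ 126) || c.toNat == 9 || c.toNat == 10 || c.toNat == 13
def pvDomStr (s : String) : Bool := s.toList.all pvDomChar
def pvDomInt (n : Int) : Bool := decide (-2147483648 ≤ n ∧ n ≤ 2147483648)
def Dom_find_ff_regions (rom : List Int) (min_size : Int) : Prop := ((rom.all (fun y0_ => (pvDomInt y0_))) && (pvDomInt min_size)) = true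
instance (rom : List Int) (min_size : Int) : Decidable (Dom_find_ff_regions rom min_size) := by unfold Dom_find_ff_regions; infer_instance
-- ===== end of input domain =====

-- B replaces A's start/None state machine (with its separate trailing-region epilogue) by a
-- run-length scan that advances run by run and appends qualifying 0xFF runs directly. (alternative)

-- ===== PORT A =====
def find_ff_regions (rom : List Int) (min_size : Int) : List (Int × Int) :=
  -- 'for i in range(len(rom))' as a fold over pyRange; rom[i] is always in range, ported as pyGetD
  let s := (PySem.List.pyRange 0 (PySem.List.len rom) 1).foldl
    (fun (s : List (Int × Int) × Option Int) i =>
      if PySem.List.pyGetD rom i 0 = 255 then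
        match s.2 with
        | none => (s.1, some i)
        | some _ => s
      else
        match s.2 with
        | some start =>
          let length := i - start
          (if min_size ≤ length then s.1 ++ [(start, length)] else s.1, none)
        | none => s)
    ([], none)
  match s.2 with
  | some start =>
    let length := PySem.List.len rom - start
    if min_size ≤ length then s.1 ++ [(start, length)] else s.1
  | none => s.1

-- ===== PORT B =====
-- Source B's outer 'while pos < n' advances run by run; here it is structural recursion on the
-- unscanned suffix, and the inner while that counts the current run is takeWhile-length.
def ffAltGo (min_size pos : Int) (regions : List (Int × Int)) : List Int → List (Int × Int)
  | [] => regions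
  | x :: xs =>
    let run : Int := 1 + (xs.takeWhile (fun y => y == x)).length
    let regions' := if x = 255 ∧ min_size ≤ run then regions ++ [(pos, run)] else regions
    ffAltGo min_size (pos + run) regions' (xs.dropWhile (fun y => y == x))
  termination_by l => l.length
  decreasing_by simpa using Nat.lt_succ_of_le (List.length_dropWhile_le _ _)

def find_ff_regions_alt (rom : List Int) (min_size : Int) : List (Int × Int) :=
  ffAltGo min_size 0 [] rom

-- ===== PRECONDITION & SPEC =====
-- A is total (it returns on every input); Pre_ excludes nothing: the stated sign split on
-- min_size holds for every integer, so every input is admitted.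
def Pre_find_ff_regions (rom : List Int) (min_size : Int) : Prop := min_size < 0 ∨ 0 ≤ min_size
instance (rom : List Int) (min_size : Int) : Decidable (Pre_find_ff_regions rom min_size) := by unfold Pre_find_ff_regions; infer_instance
def pvWitness_find_ff_regions : List Int × Int := ([255, 255, 0], 2)

def Spec_find_ff_regions (rom : List Int) (min_size : Int) (out : List (Int × Int)) : Prop := out = find_ff_regions_alt rom min_size
instance (rom : List Int) (min_size : Int) (out : List (Int × Int)) : Decidable (Spec_find_ff_regions rom min_size out) := by unfold Spec_find_ff_regions; infer_instance

-- ===== CLAIM (what is proved, stated in full; the proofs are below) =====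
def Claim_equal_find_ff_regions : Prop := ∀ (rom : List Int) (min_size : Int), Dom_find_ff_regions rom min_size → Pre_find_ff_regions rom min_size → Spec_find_ff_regions rom min_size (find_ff_regions rom min_size)

-- ===== LEMMAS AND PROOFS =====

-- A's loop body, over enumerate pairs (i, rom[i])
def ffABody (ms : Int) (s : List (Int × Int) × Option Int) (p : Int × Int) : List (Int × Int) × Option Int :=
  if p.2 = 255 then
    match s.2 with
    | none => (s.1, some p.1)
    | some _ => s
  else
    match s.2 with
    | some start =>
      (if ms ≤ p.1 - start then s.1 ++ [(start, p.1 - start)] else s.1, none)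
    | none => s

-- A's trailing-region epilogue
def ffAFin (ms n : Int) (s : List (Int × Int) × Option Int) : List (Int × Int) :=
  match s.2 with
  | some start => if ms ≤ n - start then s.1 ++ [(start, n - start)] else s.1
  | none => s.1

lemma ffA_eq (rom : List Int) (ms : Int) :
    find_ff_regions rom ms =
      ffAFin ms rom.length ((PySem.List.enumerate rom 0).foldl (ffABody ms) ([], none)) := by
  unfold find_ff_regions
  rw [PySem.List.enumerate_eq_map_pyRange (d := 0), List.foldl_map]
  rfl

lemma ffAltGo_skip (ms pos : Int) (regions : List (Int × Int)) (x : Int) (xs : List Int)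
    (hx : x ≠ 255) :
    ffAltGo ms pos regions (x :: xs) = ffAltGo ms (pos + 1) regions xs := by
  cases xs with
  | nil => simp [ffAltGo, hx]
  | cons y ys =>
    by_cases hy : y = x
    · subst hy
      rw [ffAltGo, ffAltGo]
      simp only [hx, false_and, if_false, List.takeWhile, List.dropWhile, beq_self_eq_true]
      simp only [List.length_cons] at *
      push_cast
      ring_nf
    · rw [ffAltGo]
      have hbx : (y == x) = false := by simp [hy]
      have ht : (y :: ys).takeWhile (fun z => z == x) = [] := by
        simp [List.takeWhile, hbx]
      have hd : (y :: ys).dropWhile (fun z => z == x) = y :: ys := by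
        simp [List.dropWhile, hbx]
      simp [ht, hd, hx]

-- processing a run of 0xFF from an in-run state
lemma ff_run (ms : Int) : ∀ (xs : List Int) (pos st : Int) (regions : List (Int × Int)),
    (PySem.List.enumerate xs pos).foldl (ffABody ms) (regions, some st) =
      (match xs.dropWhile (fun y => y == 255) with
       | [] => (regions, some st)
       | _ :: rest' =>
         (PySem.List.enumerate rest' (pos + ((xs.takeWhile (fun y => y == 255)).length : Int) + 1)).foldl
           (ffABody ms)
           ((if ms ≤ pos + ((xs.takeWhile (fun y => y == 255)).length : Int) - st
             then regions ++ [(st, pos + ((xs.takeWhile (fun y => y == 255)).length : Int) - st)]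
             else regions), none)) := by
  intro xs
  induction xs with
  | nil => intro pos st regions; simp [PySem.List.enumerate_nil]
  | cons x xs ih =>
    intro pos st regions
    by_cases hx : x = 255
    · subst hx
      rw [PySem.List.enumerate_cons]
      have hstep : ffABody ms (regions, some st) (pos, 255) = (regions, some st) := by
        simp [ffABody]
      rw [List.foldl_cons, hstep, ih (pos + 1) st regions]
      have ht : (((255 : Int)) :: xs).takeWhile (fun y => y == 255) =
          255 :: xs.takeWhile (fun y => y == 255) := by simp [List.takeWhile]
      have hd : (((255 : Int)) :: xs).dropWhile (fun y => y == 255) =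
          xs.dropWhile (fun y => y == 255) := by simp [List.dropWhile]
      rw [ht, hd]
      cases hrest : xs.dropWhile (fun y => y == 255) with
      | nil => simp
      | cons y rest' =>
        have h1 : pos + 1 + ((xs.takeWhile (fun y => y == 255)).length : Int) + 1
            = pos + (((255 : Int) :: xs.takeWhile (fun y => y == 255)).length : Int) + 1 := by
          simp; ring
        have h2 : pos + 1 + ((xs.takeWhile (fun y => y == 255)).length : Int) - st
            = pos + (((255 : Int) :: xs.takeWhile (fun y => y == 255)).length : Int) - st := by
          simp; ring
        simp only [h1, h2]
    · rw [PySem.List.enumerate_cons]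
      have hstep : ffABody ms (regions, some st) (pos, x) =
          ((if ms ≤ pos - st then regions ++ [(st, pos - st)] else regions), none) := by
        simp [ffABody, hx]
      rw [List.foldl_cons, hstep]
      have hbx : (x == (255 : Int)) = false := by simp [hx]
      have ht : (x :: xs).takeWhile (fun y => y == 255) = [] := by
        simp [List.takeWhile, hbx]
      have hd : (x :: xs).dropWhile (fun y => y == 255) = x :: xs := by
        simp [List.dropWhile, hbx]
      rw [ht, hd]
      simp

lemma ff_main (ms : Int) : ∀ (n : Nat) (xs : List Int), xs.length ≤ n →
    ∀ (pos : Int) (regions : List (Int × Int)),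
    ffAFin ms (pos + (xs.length : Int))
        ((PySem.List.enumerate xs pos).foldl (ffABody ms) (regions, none)) =
      ffAltGo ms pos regions xs := by
  intro n
  induction n with
  | zero =>
    intro xs hlen pos regions
    have : xs = [] := List.length_eq_zero_iff.mp (Nat.le_zero.mp hlen)
    subst this
    simp [PySem.List.enumerate_nil, ffAFin, ffAltGo]
  | succ n ih =>
    intro xs hlen pos regions
    cases xs with
    | nil => simp [PySem.List.enumerate_nil, ffAFin, ffAltGo]
    | cons x xs =>
      by_cases hx : x = 255
      · subst hx
        rw [PySem.List.enumerate_cons, List.foldl_cons]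
        have hstep : ffABody ms (regions, none) (pos, 255) = (regions, some pos) := by
          simp [ffABody]
        rw [hstep, ff_run ms xs (pos + 1) pos regions]
        cases hrest : xs.dropWhile (fun y => y == 255) with
        | nil =>
          -- the whole list is one 0xFF run reaching the end
          have hall : xs.takeWhile (fun y => y == 255) = xs := by
            have := List.takeWhile_append_dropWhile (p := fun y => y == 255) (l := xs)
            rw [hrest] at this; simpa using this
          rw [ffAltGo]
          simp only [hall, hrest]
          simp only [ffAFin]
          simp only [List.length_cons]
          push_cast
          have : pos + ((xs.length : Int) + 1) - pos = 1 + (xs.length : Int) := by ring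
          rw [this]
          simp [ffAltGo]
        | cons y rest' =>
          -- the run ends at a non-0xFF byte y, then the scan continues
          have hy : (fun z => z == (255 : Int)) y = false := by
            have hne : xs.dropWhile (fun z => z == (255 : Int)) ≠ [] := by simp [hrest]
            have h2 := List.head_dropWhile_not (fun z => z == (255 : Int)) hne
            have h3 : (xs.dropWhile (fun z => z == (255 : Int))).head hne = y := by
              simp [hrest]
            rw [h3] at h2; exact h2
          have hy' : y ≠ 255 := by simpa using hy
          set t : Nat := (xs.takeWhile (fun z => z == 255)).length with htdef
          have hlen2 : xs.length = t + 1 + rest'.length := by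
            have := List.takeWhile_append_dropWhile (p := fun z => z == (255 : Int)) (l := xs)
            rw [hrest] at this
            calc xs.length
                = (xs.takeWhile (fun z => z == (255:Int)) ++ (y :: rest')).length := by rw [this]
              _ = t + 1 + rest'.length := by simp [htdef]; ring
          have hrestlen : rest'.length ≤ n := by
            have hx2 : xs.length ≤ n := by simpa using hlen
            omega
          -- left side: apply the main IH to the tail after the run
          have hn : pos + (((255 : Int) :: xs).length : Int)
              = (pos + 1 + (t : Int) + 1) + (rest'.length : Int) := by
            simp [hlen2]; ring
          rw [hn, ih rest' hrestlen (pos + 1 + (t : Int) + 1)]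
          -- right side: unfold one B step and skip the non-0xFF byte y
          rw [ffAltGo]
          simp only [hrest]
          rw [ffAltGo_skip ms (pos + (1 + (t : Int))) _ y rest' hy']
          have harith1 : pos + 1 + (t : Int) - pos = 1 + (t : Int) := by ring
          have harith2 : pos + (1 + (t : Int)) + 1 = pos + 1 + (t : Int) + 1 := by ring
          rw [harith1, harith2]
          simp [← htdef]
      · rw [PySem.List.enumerate_cons, List.foldl_cons]
        have hstep : ffABody ms (regions, none) (pos, x) = (regions, none) := by
          simp [ffABody, hx]
        rw [hstep]
        have hn : pos + (((x :: xs).length : Int)) = (pos + 1) + (xs.length : Int) := by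
          simp; ring
        rw [hn, ih xs (by simp at hlen; omega) (pos + 1) regions,
          ffAltGo_skip ms pos regions x xs hx]

-- ===== VERDICT (by name: the statement is the Claim_ definition above) =====
theorem find_ff_regions_spec : Claim_equal_find_ff_regions := by
  intro rom ms _ _
  unfold Spec_find_ff_regions find_ff_regions_alt
  rw [ffA_eq]
  have := ff_main ms rom.length rom le_rfl 0 []
  simpa using this
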